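-- pv_equiv track=rewrite | github.com/gmy2013/icse26_failure_refinement | berland_election_simulator/berland_election_simulator/main.py | count_valid_reversals
-- ===== SOURCE A (Python) =====
-- def count_valid_reversals(s):
--     n = len(s)
--     valid_count = 0
--
--     # Convert to +/-1 array for easier prefix sum manipulation
--     a = [1 if c == '(' else -1 for c in s]
--     prefix_sum = [0] * (n + 1)
--     for i in range(n):
--         prefix_sum[i + 1] = prefix_sum[i] + a[i]
--
--     # Iterate all possible intervals to reverse
--     for l in range(n):
--         for r in range(l, n):
--             # Reverse subarray [l, r] in transformed bracket representation
--             b = a[:l] + [-x for x in a[l:r+1][::-1]] + a[r+1:]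
--             # Check validity via prefix sum
--             balance = 0
--             is_valid = True
--             for x in b:
--                 balance += x
--                 if balance < 0:
--                     is_valid = False
--                     break
--             if is_valid and balance == 0:
--                 valid_count += 1
--
--     return valid_count
-- ===== SOURCE B (Python) =====
-- def count_valid_reversals(s):
--     n = len(s)
--     # prefix balances: pre[i] = balance of s[:i]
--     pre = [0] * (n + 1)
--     for i, c in enumerate(s):
--         pre[i + 1] = pre[i] + (1 if c == '(' else -1)
--     total = pre[n]
--     # tail[i] = min(pre[i..n])
--     tail = [0] * (n + 1)
--     tail[n] = pre[n]
--     for i in range(n - 1, -1, -1):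
--         tail[i] = min(pre[i], tail[i + 1])
--     count = 0
--     h = 0  # running head minimum: min(h, pre[l]) = min(pre[0..l])
--     for l in range(n):
--         h = min(h, pre[l])
--         if h >= 0:
--             m = pre[l]  # running minimum: min(m, pre[r+1]) = min(pre[l..r+1])
--             for r in range(l, n):
--                 m = min(m, pre[r + 1])
--                 d = pre[r + 1] - pre[l]  # balance of the reversed segment, negated sum
--                 if d <= m and 2 * d <= tail[r + 1] and total == 2 * d:
--                     count += 1
--     return count
-- ===== Notes on version B (the rewrite author's own statement) =====
-- stated objective: faster
-- what changed: Instead of materializing the reversed segment and rescanning the whole string for each of the O(n^2) intervals, B precomputes prefix balances, a suffix-minimum array and running minima, and decides each interval's validity in O(1) from four linear conditions on those minima.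
import Mathlib
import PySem

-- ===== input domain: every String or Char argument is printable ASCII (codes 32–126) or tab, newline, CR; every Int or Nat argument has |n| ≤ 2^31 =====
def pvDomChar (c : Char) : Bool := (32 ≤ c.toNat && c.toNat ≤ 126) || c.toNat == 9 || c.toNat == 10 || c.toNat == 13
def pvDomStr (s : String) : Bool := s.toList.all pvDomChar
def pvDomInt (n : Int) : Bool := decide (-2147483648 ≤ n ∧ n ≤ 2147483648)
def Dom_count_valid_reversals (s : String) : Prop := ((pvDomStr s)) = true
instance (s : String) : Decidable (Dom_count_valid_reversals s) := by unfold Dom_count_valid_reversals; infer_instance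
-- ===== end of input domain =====

-- B replaces A's per-interval rebuild-and-rescan (O(n^3)) by prefix balances with
-- suffix-minimum and running-minimum arrays, deciding each interval in O(1) (O(n^2)).

-- ===== PORT A =====
-- A's inner scan: balance accumulation with early break on balance < 0
def pvCheckA : Int → List Int → Bool × Int
  | bal, [] => (true, bal)
  | bal, x :: xs =>
    let b2 := bal + x
    if b2 < 0 then (false, b2) else pvCheckA b2 xs

def count_valid_reversals (s : String) : Int :=
  let n := s.length
  let a := s.toList.map (fun c => if c = '(' then (1 : Int) else -1)
  (List.range n).foldl (fun acc l =>
    (List.range' l (n - l)).foldl (fun acc2 r =>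
      let b := a.take l ++ (((a.drop l).take (r + 1 - l)).reverse.map (fun x => -x)) ++ a.drop (r + 1)
      let res := pvCheckA 0 b
      if res.1 && res.2 == 0 then acc2 + 1 else acc2) acc) 0

-- ===== PORT B =====
-- B's backward suffix-minimum pass over the prefix-balance array
def pvSuffMin : List Int → List Int
  | [] => []
  | [x] => [x]
  | x :: y :: xs =>
    let t := pvSuffMin (y :: xs)
    min x (t.headD 0) :: t

def count_valid_reversals_alt (s : String) : Int :=
  let n := s.length
  let a := s.toList.map (fun c => if c = '(' then (1 : Int) else -1)
  let pre := List.scanl (· + ·) 0 a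
  let total := pre.getD n 0
  let tail := pvSuffMin pre
  ((List.range n).foldl (fun (st : Int × Int) l =>
    let h := min st.1 (pre.getD l 0)
    let cnt :=
      if 0 ≤ h then
        ((List.range' l (n - l)).foldl (fun (st2 : Int × Int) r =>
          let m := min st2.1 (pre.getD (r + 1) 0)
          let d := pre.getD (r + 1) 0 - pre.getD l 0
          (m, if d ≤ m ∧ 2 * d ≤ tail.getD (r + 1) 0 ∧ total = 2 * d then st2.2 + 1 else st2.2))
          (pre.getD l 0, st.2)).2
      else st.2
    (h, cnt)) (0, 0)).2

-- ===== PRECONDITION & SPEC =====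
def Spec_count_valid_reversals (s : String) (out : Int) : Prop := out = count_valid_reversals_alt s
instance (s : String) (out : Int) : Decidable (Spec_count_valid_reversals s out) := by unfold Spec_count_valid_reversals; infer_instance

-- ===== CLAIM (what is proved, stated in full; the proofs are below) =====
def Claim_equal_count_valid_reversals : Prop := ∀ (s : String), Dom_count_valid_reversals s → Spec_count_valid_reversals s (count_valid_reversals s)

-- ===== LEMMAS AND PROOFS =====

-- minimum over all prefix sums of a list (including the empty prefix)
def pvMinpre : List Int → Int
  | [] => 0
  | x :: xs => min 0 (x + pvMinpre xs)

-- named forms of the fold bodies of the two ports (definitionally equal to the lambdas)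
def pvStepB (a : List Int) (l : Nat) (st2 : Int × Int) (r : Nat) : Int × Int :=
  let m := min st2.1 ((List.scanl (· + ·) 0 a).getD (r + 1) 0)
  let d := (List.scanl (· + ·) 0 a).getD (r + 1) 0 - (List.scanl (· + ·) 0 a).getD l 0
  (m, if d ≤ m ∧ 2 * d ≤ (pvSuffMin (List.scanl (· + ·) 0 a)).getD (r + 1) 0 ∧
        (List.scanl (· + ·) 0 a).getD a.length 0 = 2 * d then st2.2 + 1 else st2.2)

def pvStepO (a : List Int) (st : Int × Int) (l : Nat) : Int × Int :=
  let h := min st.1 ((List.scanl (· + ·) 0 a).getD l 0)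
  let cnt :=
    if 0 ≤ h then
      ((List.range' l (a.length - l)).foldl (pvStepB a l)
        ((List.scanl (· + ·) 0 a).getD l 0, st.2)).2
    else st.2
  (h, cnt)

-- the per-interval conditions, in closed form
def pvCondA (a : List Int) (l r : Nat) : Bool :=
  let b := a.take l ++ (((a.drop l).take (r + 1 - l)).reverse.map (fun x => -x)) ++ a.drop (r + 1)
  let res := pvCheckA 0 b
  res.1 && res.2 == 0

def pvCondB (a : List Int) (l r : Nat) : Bool :=
  decide ((a.take (r + 1)).sum - (a.take l).sum
      ≤ (a.take l).sum + pvMinpre ((a.drop l).take (r + 1 - l)) ∧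
    2 * ((a.take (r + 1)).sum - (a.take l).sum)
      ≤ (a.take (r + 1)).sum + pvMinpre (a.drop (r + 1)) ∧
    a.sum = 2 * ((a.take (r + 1)).sum - (a.take l).sum))

theorem pvMinpre_nonpos (xs : List Int) : pvMinpre xs ≤ 0 := by
  cases xs <;> simp [pvMinpre]

theorem pvMinpre_le_sum (xs : List Int) : pvMinpre xs ≤ xs.sum := by
  induction xs with
  | nil => simp [pvMinpre]
  | cons x t ih => simp only [pvMinpre, List.sum_cons]; omega

theorem pvMinpre_append (xs ys : List Int) :
    pvMinpre (xs ++ ys) = min (pvMinpre xs) (xs.sum + pvMinpre ys) := by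
  induction xs with
  | nil => have := pvMinpre_nonpos ys; simp [pvMinpre]; omega
  | cons x t ih =>
    simp only [List.cons_append, pvMinpre, ih, List.sum_cons]
    omega

theorem pvMinpre_snoc (xs : List Int) (y : Int) :
    pvMinpre (xs ++ [y]) = min (pvMinpre xs) (xs.sum + y) := by
  have h := pvMinpre_le_sum xs
  rw [pvMinpre_append]
  simp [pvMinpre]; omega

theorem pvSum_map_neg (xs : List Int) : (xs.map (fun x => -x)).sum = -xs.sum := by
  induction xs with
  | nil => simp
  | cons x t ih => simp [ih]; ring

theorem pvMinpre_rev_neg (xs : List Int) :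
    pvMinpre (xs.reverse.map (fun x => -x)) = pvMinpre xs - xs.sum := by
  induction xs with
  | nil => simp [pvMinpre]
  | cons x t ih =>
    have h1 := pvMinpre_nonpos t
    simp only [List.reverse_cons, List.map_append, pvMinpre_append, ih,
      pvSum_map_neg, List.sum_reverse, List.map_cons, List.map_nil,
      pvMinpre, List.sum_cons]
    omega

-- characterization of A's scan
theorem pvCheckA_iff (xs : List Int) (bal : Int) (hb : 0 ≤ bal) :
    (((pvCheckA bal xs).1 && ((pvCheckA bal xs).2 == 0)) = true ↔
      0 ≤ bal + pvMinpre xs ∧ bal + xs.sum = 0) := by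
  induction xs generalizing bal with
  | nil =>
    simp only [pvCheckA, pvMinpre, List.sum_nil, Bool.true_and, beq_iff_eq]
    omega
  | cons x t ih =>
    simp only [pvCheckA, pvMinpre, List.sum_cons]
    by_cases h : bal + x < 0
    · have h2 := pvMinpre_nonpos t
      simp only [if_pos h, Bool.false_and, Bool.false_eq_true, false_iff]
      omega
    · rw [if_neg h]
      rw [ih (bal + x) (by omega)]
      omega

-- getD of scanl: prefix sums
theorem pvScanl_getD (a : List Int) (c : Int) (i : Nat) (hi : i ≤ a.length) :
    (List.scanl (· + ·) c a).getD i 0 = c + (a.take i).sum := by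
  induction a generalizing c i with
  | nil =>
    have h0 : i = 0 := by simpa using hi
    subst h0; simp [List.getD]
  | cons x t ih =>
    cases i with
    | zero => simp [List.getD]
    | succ j =>
      simp only [List.scanl_cons, List.getD, List.getElem?_cons_succ, List.take_succ_cons,
        List.sum_cons]
      have := ih (c + x) j (by simpa using hi)
      simp only [List.getD] at this
      rw [this]; ring

theorem pvHeadD_eq_getD (l : List Int) (d : Int) : l.headD d = l.getD 0 d := by
  cases l <;> simp

-- getD of the suffix-minimum array over scanl
theorem pvSuffMin_getD (a : List Int) (c : Int) (i : Nat) (hi : i ≤ a.length) :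
    (pvSuffMin (List.scanl (· + ·) c a)).getD i 0 = c + (a.take i).sum + pvMinpre (a.drop i) := by
  induction a generalizing c i with
  | nil =>
    have h0 : i = 0 := by simpa using hi
    subst h0; simp [pvSuffMin, pvMinpre, List.getD]
  | cons x t ih =>
    have hscan : List.scanl (· + ·) c (x :: t) = c :: List.scanl (· + ·) (c + x) t := by
      simp
    rw [hscan]
    have hne : List.scanl (· + ·) (c + x) t ≠ [] := by cases t <;> simp [List.scanl]
    obtain ⟨y, ys, hys⟩ := List.exists_cons_of_ne_nil hne
    cases i with
    | zero =>
      have h0 := ih (c + x) 0 (by omega)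
      rw [hys] at h0 ⊢
      simp only [pvSuffMin, List.getD, List.getElem?_cons_zero, Option.getD_some] at h0 ⊢
      rw [pvHeadD_eq_getD]
      simp only [List.getD]
      simp only [List.take_zero, List.sum_nil, List.drop_zero, pvMinpre] at h0 ⊢
      omega
    | succ j =>
      have hj := ih (c + x) j (by simpa using hi)
      rw [hys] at hj ⊢
      simp only [pvSuffMin, List.getD, List.getElem?_cons_succ, List.take_succ_cons,
        List.drop_succ_cons]
      simp only [List.getD] at hj
      rw [hj]
      simp only [List.sum_cons]
      ring

theorem pvSeg_sum (a : List Int) (l r : Nat) (hlr : l ≤ r) :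
    ((a.drop l).take (r + 1 - l)).sum = (a.take (r + 1)).sum - (a.take l).sum := by
  have h : a.take (r + 1) = a.take l ++ (a.drop l).take (r + 1 - l) := by
    rw [← List.take_add]
    congr 1
    omega
  rw [h, List.sum_append]
  ring

theorem pvDrop_sum (a : List Int) (k : Nat) :
    (a.drop k).sum = a.sum - (a.take k).sum := by
  have := List.sum_take_add_sum_drop a k
  omega

-- core: A's condition on interval [l, r] decomposes into a head part and B's O(1) check
theorem pvCondA_eq (a : List Int) (l r : Nat) (hlr : l ≤ r) :
    (pvCondA a l r = true ↔
      0 ≤ pvMinpre (a.take l) ∧ pvCondB a l r = true) := by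
  unfold pvCondA pvCondB
  rw [pvCheckA_iff _ 0 le_rfl]
  have h1 := pvMinpre_nonpos (a.take l)
  have h2 := pvMinpre_nonpos ((a.drop l).take (r + 1 - l))
  have h3 := pvMinpre_nonpos (a.drop (r + 1))
  simp only [List.append_assoc, pvMinpre_append, List.sum_append, pvMinpre_rev_neg,
    pvSum_map_neg, List.sum_reverse, pvSeg_sum a l r hlr, pvDrop_sum a (r + 1),
    decide_eq_true_eq, zero_add]
  omega

-- generic: fold of an if-increment is counting
theorem pvFoldl_count (rs : List Nat) (p : Nat → Bool) (acc : Int) :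
    rs.foldl (fun a r => if p r then a + 1 else a) acc
      = acc + ((rs.filter p).length : Int) := by
  induction rs generalizing acc with
  | nil => simp
  | cons x t ih =>
    simp only [List.foldl_cons, List.filter_cons]
    by_cases h : p x
    · simp [h, ih]; omega
    · simp [h, ih]

-- one step of B's inner fold, in closed form
theorem pvStepB_eq (a : List Int) (l r : Nat) (st2 : Int × Int)
    (hlr : l ≤ r) (hr : r < a.length)
    (hm : min st2.1 ((List.scanl (· + ·) 0 a).getD (r + 1) 0)
        = (a.take l).sum + pvMinpre ((a.drop l).take (r + 1 - l))) :
    pvStepB a l st2 r =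
      ((a.take l).sum + pvMinpre ((a.drop l).take (r + 1 - l)),
       if pvCondB a l r then st2.2 + 1 else st2.2) := by
  have hln : l ≤ a.length := by omega
  have hgl : (List.scanl (· + ·) 0 a).getD l 0 = (a.take l).sum := by
    rw [pvScanl_getD a 0 l hln]; ring
  have hgr : (List.scanl (· + ·) 0 a).getD (r + 1) 0 = (a.take (r + 1)).sum := by
    rw [pvScanl_getD a 0 (r + 1) (by omega)]; ring
  have hgn : (List.scanl (· + ·) 0 a).getD a.length 0 = a.sum := by
    rw [pvScanl_getD a 0 a.length le_rfl]; simp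
  have hgt : (pvSuffMin (List.scanl (· + ·) 0 a)).getD (r + 1) 0
      = (a.take (r + 1)).sum + pvMinpre (a.drop (r + 1)) := by
    rw [pvSuffMin_getD a 0 (r + 1) (by omega)]; ring
  rw [hgr] at hm
  unfold pvStepB pvCondB
  simp only [hgl, hgr, hgn, hgt, hm, decide_eq_true_eq]

-- the running-minimum invariant advances by one position
theorem pvMin_advance (a : List Int) (l r : Nat) (hlr : l ≤ r) (hr : r + 1 < a.length) :
    min ((a.take l).sum + pvMinpre ((a.drop l).take (r + 1 - l)))
        ((List.scanl (· + ·) 0 a).getD (r + 1 + 1) 0)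
      = (a.take l).sum + pvMinpre ((a.drop l).take (r + 1 + 1 - l)) := by
  have hgr2 : (List.scanl (· + ·) 0 a).getD (r + 1 + 1) 0 = (a.take (r + 1 + 1)).sum := by
    rw [pvScanl_getD a 0 (r + 1 + 1) (by omega)]; ring
  have htk : (a.drop l).take (r + 1 + 1 - l)
      = (a.drop l).take (r + 1 - l) ++ [a[r + 1]'hr] := by
    have h1 : r + 1 + 1 - l = (r + 1 - l) + 1 := by omega
    rw [h1, List.take_add_one]
    have h2 : (a.drop l)[r + 1 - l]? = some (a[r + 1]'hr) := by
      rw [List.getElem?_drop]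
      have h3 : l + (r + 1 - l) = r + 1 := by omega
      rw [h3, List.getElem?_eq_getElem hr]
    simp [h2]
  have hseg : ((a.drop l).take (r + 1 - l)).sum = (a.take (r + 1)).sum - (a.take l).sum :=
    pvSeg_sum a l r hlr
  have htk2 : (a.take (r + 1 + 1)).sum = (a.take (r + 1)).sum + a[r + 1]'hr := by
    have h5 : a.take (r + 1 + 1) = a.take (r + 1) ++ [a[r + 1]'hr] := by
      rw [List.take_add_one, List.getElem?_eq_getElem hr]
      simp
    rw [h5, List.sum_append]
    simp
  rw [hgr2, htk2, htk, pvMinpre_snoc, hseg]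
  omega

-- B's inner fold counts pvCondB
theorem pvB_inner (a : List Int) (l : Nat) :
    ∀ (k r0 : Nat) (m cnt : Int), l ≤ r0 → r0 + k = a.length →
    (min m ((List.scanl (· + ·) 0 a).getD (r0 + 1) 0)
        = (a.take l).sum + pvMinpre ((a.drop l).take (r0 + 1 - l))) →
    ((List.range' r0 k).foldl (pvStepB a l) (m, cnt)).2
      = cnt + (((List.range' r0 k).filter (pvCondB a l)).length : Int) := by
  intro k
  induction k with
  | zero => intro r0 m cnt _ _ _; simp
  | succ j ih =>
    intro r0 m cnt hlr0 hrk hm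
    have hr0n : r0 < a.length := by omega
    rw [List.range'_succ]
    simp only [List.foldl_cons, List.filter_cons]
    rw [pvStepB_eq a l r0 (m, cnt) hlr0 hr0n hm]
    rcases Nat.eq_zero_or_pos j with hj | hj
    · subst hj
      simp only [List.range'_zero, List.foldl_nil]
      by_cases hc : pvCondB a l r0 <;> simp [hc]
    · have hnext := pvMin_advance a l r0 hlr0 (by omega)
      by_cases hc : pvCondB a l r0
      · rw [if_pos hc]
        rw [ih (r0 + 1) _ (cnt + 1) (by omega) (by omega) hnext]
        simp [hc]
        ring
      · rw [if_neg hc]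
        rw [ih (r0 + 1) _ cnt (by omega) (by omega) hnext]
        simp [hc]

-- head-minimum invariant advances by one position
theorem pvHead_advance (a : List Int) (l : Nat) (hl : l < a.length) :
    min (pvMinpre (a.take l)) ((List.scanl (· + ·) 0 a).getD (l + 1) 0)
      = pvMinpre (a.take (l + 1)) := by
  have hg : (List.scanl (· + ·) 0 a).getD (l + 1) 0 = (a.take (l + 1)).sum := by
    rw [pvScanl_getD a 0 (l + 1) (by omega)]; ring
  have htk : a.take (l + 1) = a.take l ++ [a[l]'hl] := by
    rw [List.take_add_one, List.getElem?_eq_getElem hl]; simp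
  have htk2 : (a.take (l + 1)).sum = (a.take l).sum + a[l]'hl := by
    rw [htk, List.sum_append]; simp
  rw [hg, htk2, htk, pvMinpre_snoc]

-- B's outer fold counts pvCondA per left endpoint
theorem pvB_outer (a : List Int) :
    ∀ (k l0 : Nat) (h cnt : Int), l0 + k = a.length →
    (min h ((List.scanl (· + ·) 0 a).getD l0 0) = pvMinpre (a.take l0)) →
    ((List.range' l0 k).foldl (pvStepO a) (h, cnt)).2
      = cnt + ((List.range' l0 k).map (fun l =>
          (((List.range' l (a.length - l)).filter (pvCondA a l)).length : Int))).sum := by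
  intro k
  induction k with
  | zero => intro l0 h cnt _ _; simp
  | succ j ih =>
    intro l0 h cnt hlk hm
    have hl0 : l0 < a.length := by omega
    rw [List.range'_succ]
    simp only [List.foldl_cons, List.map_cons, List.sum_cons]
    have hfilter : (List.range' l0 (a.length - l0)).filter (pvCondA a l0)
        = if 0 ≤ pvMinpre (a.take l0)
          then (List.range' l0 (a.length - l0)).filter (pvCondB a l0)
          else [] := by
      split_ifs with hpos
      · apply List.filter_congr
        intro r hrmem
        have hlr : l0 ≤ r := (List.mem_range'_1.mp hrmem).1
        have hiff := pvCondA_eq a l0 r hlr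
        cases hA : pvCondA a l0 r <;> cases hB : pvCondB a l0 r <;> simp_all
      · rw [List.filter_eq_nil_iff]
        intro r hrmem
        have hlr : l0 ≤ r := (List.mem_range'_1.mp hrmem).1
        intro hA
        exact hpos ((pvCondA_eq a l0 r hlr).mp hA).1
    have hstep : pvStepO a (h, cnt) l0 =
        (pvMinpre (a.take l0),
          cnt + (((List.range' l0 (a.length - l0)).filter (pvCondA a l0)).length : Int)) := by
      unfold pvStepO
      simp only [hm]
      rw [hfilter]
      split_ifs with hpos
      · have hginv : min ((List.scanl (· + ·) 0 a).getD l0 0)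
            ((List.scanl (· + ·) 0 a).getD (l0 + 1) 0)
            = (a.take l0).sum + pvMinpre ((a.drop l0).take (l0 + 1 - l0)) := by
          have hg0 : (List.scanl (· + ·) 0 a).getD l0 0 = (a.take l0).sum := by
            rw [pvScanl_getD a 0 l0 (by omega)]; ring
          have hg1 : (List.scanl (· + ·) 0 a).getD (l0 + 1) 0 = (a.take (l0 + 1)).sum := by
            rw [pvScanl_getD a 0 (l0 + 1) (by omega)]; ring
          have h1 : l0 + 1 - l0 = 1 := by omega
          have htk : (a.drop l0).take 1 = [a[l0]'hl0] := by
            have h2 : (a.drop l0)[0]? = some (a[l0]'hl0) := by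
              rw [List.getElem?_drop, List.getElem?_eq_getElem (by omega)]
              simp
            rw [List.take_one]
            simp [List.head?_eq_getElem?, h2]
          have htk2 : (a.take (l0 + 1)).sum = (a.take l0).sum + a[l0]'hl0 := by
            have h5 : a.take (l0 + 1) = a.take l0 ++ [a[l0]'hl0] := by
              rw [List.take_add_one, List.getElem?_eq_getElem hl0]
              simp
            rw [h5, List.sum_append]
            simp
          rw [hg0, hg1, h1, htk, htk2]
          simp [pvMinpre]
          omega
        rw [pvB_inner a l0 (a.length - l0) l0 _ cnt le_rfl (by omega) hginv]
      · simp
    rw [hstep]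
    rw [ih (l0 + 1) _ _ (by omega) (by rw [pvHead_advance a l0 hl0])]
    ring

theorem pvFoldl_add_map (xs : List Nat) (g : Nat → Int) (acc : Int) :
    xs.foldl (fun a x => a + g x) acc = acc + (xs.map g).sum := by
  induction xs generalizing acc with
  | nil => simp
  | cons x t ih => simp [ih]; ring

-- A's port's nested folds count pvCondA
theorem pvA_closed (a : List Int) (n : Nat) :
    (List.range n).foldl (fun acc l =>
      (List.range' l (n - l)).foldl (fun acc2 r =>
        let b := a.take l ++ (((a.drop l).take (r + 1 - l)).reverse.map (fun x => -x)) ++ a.drop (r + 1)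
        let res := pvCheckA 0 b
        if res.1 && res.2 == 0 then acc2 + 1 else acc2) acc) 0
    = ((List.range n).map (fun l =>
        (((List.range' l (n - l)).filter (pvCondA a l)).length : Int))).sum := by
  have hinner : ∀ (acc : Int), ∀ l ∈ List.range n,
      (List.range' l (n - l)).foldl (fun acc2 r =>
        let b := a.take l ++ (((a.drop l).take (r + 1 - l)).reverse.map (fun x => -x)) ++ a.drop (r + 1)
        let res := pvCheckA 0 b
        if res.1 && res.2 == 0 then acc2 + 1 else acc2) acc
      = acc + (((List.range' l (n - l)).filter (pvCondA a l)).length : Int) := by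
    intro acc l _
    rw [← pvFoldl_count (List.range' l (n - l)) (pvCondA a l) acc]
    rfl
  rw [List.foldl_ext
      (fun (acc : Int) l =>
        (List.range' l (n - l)).foldl (fun acc2 r =>
          let b := a.take l ++ (((a.drop l).take (r + 1 - l)).reverse.map (fun x => -x)) ++ a.drop (r + 1)
          let res := pvCheckA 0 b
          if res.1 && res.2 == 0 then acc2 + 1 else acc2) acc)
      (fun (acc : Int) l => acc + (((List.range' l (n - l)).filter (pvCondA a l)).length : Int))
      0 hinner,
    pvFoldl_add_map]
  simp

-- ===== VERDICT (by name: the statement is the Claim_ definition above) =====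
theorem count_valid_reversals_spec : Claim_equal_count_valid_reversals := by
  intro s _
  show count_valid_reversals s = count_valid_reversals_alt s
  simp only [count_valid_reversals, count_valid_reversals_alt]
  rw [pvA_closed (s.toList.map fun c => if c = '(' then (1 : Int) else -1) s.length]
  have hn : s.length = (s.toList.map fun c => if c = '(' then (1 : Int) else -1).length := by
    simp
  rw [hn, List.range_eq_range']
  have h0 : min (0 : Int)
      ((List.scanl (· + ·) 0 (s.toList.map fun c => if c = '(' then (1 : Int) else -1)).getD 0 0)
      = pvMinpre ((s.toList.map fun c => if c = '(' then (1 : Int) else -1).take 0) := by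
    rw [pvScanl_getD _ 0 0 (by omega)]
    simp [pvMinpre]
  have hB := pvB_outer (s.toList.map fun c => if c = '(' then (1 : Int) else -1)
    (s.toList.map fun c => if c = '(' then (1 : Int) else -1).length 0 0 0 (by omega) h0
  refine Eq.symm ?_
  show ((List.range' 0 (s.toList.map fun c => if c = '(' then (1 : Int) else -1).length).foldl
      (pvStepO (s.toList.map fun c => if c = '(' then (1 : Int) else -1)) ((0 : Int), (0 : Int))).2 = _
  rw [hB]
  ring
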